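-- pv_equiv track=rewrite | github.com/MimTohidi/self-replication | self-replicant.py | create_shape_mask
-- ===== SOURCE A (Python) =====
-- def create_shape_mask(grid_size):
--     mask = [[0 for _ in range(grid_size)] for _ in range(grid_size)]
--     center = grid_size // 2
--     for y in range(grid_size):
--         for x in range(grid_size):
--             if abs(x - center) + abs(y - center) <= grid_size // 3:
--                 mask[y][x] = 1
--     return mask
-- ===== SOURCE B (Python) =====
-- def create_shape_mask(grid_size):
--     center = grid_size // 2
--     reach = grid_size // 3
--
--     def row(y):
--         rem = reach - abs(y - center)
--         if rem < 0:
--             return [0] * grid_size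
--         return [0] * (center - rem) + [1] * (2 * rem + 1) + [0] * (grid_size - center - rem - 1)
--
--     return [row(y) for y in range(grid_size)]
-- ===== Notes on version B (the rewrite author's own statement) =====
-- stated objective: faster
-- what changed: Per row, B computes the diamond's horizontal half-width arithmetically and builds the row from three replicated blocks, eliminating A's inner per-cell loop with its Manhattan-distance test.
import Mathlib
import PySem

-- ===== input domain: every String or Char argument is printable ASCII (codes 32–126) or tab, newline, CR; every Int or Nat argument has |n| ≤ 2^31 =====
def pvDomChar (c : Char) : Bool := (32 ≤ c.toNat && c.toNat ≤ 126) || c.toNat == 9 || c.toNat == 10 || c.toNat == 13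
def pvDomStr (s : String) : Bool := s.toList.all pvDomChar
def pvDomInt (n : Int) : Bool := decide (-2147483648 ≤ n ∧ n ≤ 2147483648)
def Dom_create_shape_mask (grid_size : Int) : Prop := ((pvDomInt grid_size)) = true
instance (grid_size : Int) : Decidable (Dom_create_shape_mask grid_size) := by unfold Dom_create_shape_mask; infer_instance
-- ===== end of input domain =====

-- B replaces A's per-cell Manhattan-distance test by computing each row's contiguous
-- 1-block arithmetically and concatenating three replicated segments (objective: faster, constant-factor).

-- ===== PORT A =====
def create_shape_mask (grid_size : Int) : List (List Int) :=
  let mask : List (List Int) :=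
    (PySem.List.pyRange 0 grid_size 1).map (fun _ =>
      (PySem.List.pyRange 0 grid_size 1).map (fun _ => (0 : Int)))
  let center := PySem.Int.floordiv grid_size 2
  (PySem.List.pyRange 0 grid_size 1).foldl (fun mask y =>
    (PySem.List.pyRange 0 grid_size 1).foldl (fun mask x =>
      if |x - center| + |y - center| ≤ PySem.Int.floordiv grid_size 3 then
        -- mask[y][x] = 1: y and x come from range(grid_size), so they are nonnegative
        -- in-range indices and modify/set via .toNat is exact here
        mask.modify y.toNat (fun row => row.set x.toNat 1)
      else mask) mask) mask

-- ===== PORT B =====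
def create_shape_mask_alt (grid_size : Int) : List (List Int) :=
  let center := PySem.Int.floordiv grid_size 2
  let reach := PySem.Int.floordiv grid_size 3
  (PySem.List.pyRange 0 grid_size 1).map (fun y =>
    let rem := reach - |y - center|
    if rem < 0 then
      List.replicate grid_size.toNat (0 : Int)
    else
      -- Python's [0]*k is [] for negative k, exactly .toNat's clamping
      (List.replicate (center - rem).toNat (0 : Int)
        ++ List.replicate (2 * rem + 1).toNat (1 : Int))
        ++ List.replicate (grid_size - center - rem - 1).toNat (0 : Int))

-- ===== PRECONDITION & SPEC =====
def Spec_create_shape_mask (grid_size : Int) (out : List (List Int)) : Prop := out = create_shape_mask_alt grid_size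
instance (grid_size : Int) (out : List (List Int)) : Decidable (Spec_create_shape_mask grid_size out) := by unfold Spec_create_shape_mask; infer_instance

-- ===== CLAIM (what is proved, stated in full; the proofs are below) =====
def Claim_equal_create_shape_mask : Prop := ∀ (grid_size : Int), Dom_create_shape_mask grid_size → Spec_create_shape_mask grid_size (create_shape_mask grid_size)

-- ===== LEMMAS AND PROOFS =====

theorem pv_modify_modify {α : Type} (l : List α) (i : Nat) (f g : α → α) :
    (l.modify i f).modify i g = l.modify i (fun a => g (f a)) := by
  apply List.ext_getElem?
  intro j
  simp only [List.getElem?_modify]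
  cases l[j]? with
  | none => rfl
  | some a => by_cases h : i = j <;> simp [h]

/-- An iterated in-place update of row `k` is a single `modify` by the folded row update. -/
theorem pv_foldl_modify {α : Type} (l : List α) (k : Nat)
    (step : List Int → α → List Int) :
    ∀ m : List (List Int),
      l.foldl (fun m x => m.modify k (fun r => step r x)) m
        = m.modify k (fun r => l.foldl step r) := by
  induction l with
  | nil => intro m; simp only [List.foldl_nil]; rw [show (fun r : List Int => r) = id from rfl, List.modify_id]
  | cons a t ih => intro m; simp [List.foldl_cons, ih, pv_modify_modify]

/-- Folding `modify k (g k)` over `range n` rewrites the first `n` entries pointwise. -/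
theorem pv_foldl_range_modify (g : Nat → List Int → List Int) :
    ∀ (n : Nat) (m : List (List Int)), n ≤ m.length →
      (List.range n).foldl (fun m k => m.modify k (g k)) m
        = (List.range n).map (fun k => g k (m[k]?.getD [])) ++ m.drop n := by
  intro n
  induction n with
  | zero => intro m _; simp
  | succ n ih =>
    intro m hn
    rw [List.range_succ, List.foldl_append, ih m (by omega), List.foldl_cons, List.foldl_nil]
    have hdrop : m.drop n = m[n]?.getD [] :: m.drop (n + 1) := by
      rw [List.drop_eq_getElem_cons (by omega)]
      simp [List.getElem?_eq_getElem (by omega : n < m.length)]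
    rw [hdrop, List.modify_eq_set, List.map_append]
    have hlen : ((List.range n).map (fun k => g k (m[k]?.getD []))).length = n := by simp
    rw [List.getElem?_append_right (by simp), hlen]
    simp [hlen]

/-- Setting to 1 exactly the positions of `range n` satisfying `Q` turns the row into an indicator map. -/
theorem pv_foldl_range_set (Q : Nat → Prop) [DecidablePred Q] :
    ∀ (n : Nat) (row : List Int), n ≤ row.length →
      (List.range n).foldl (fun r k => if Q k then r.set k 1 else r) row
        = (List.range n).map (fun k => if Q k then (1 : Int) else row[k]?.getD 0) ++ row.drop n := by
  intro n
  induction n with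
  | zero => intro row _; simp
  | succ n ih =>
    intro row hn
    rw [List.range_succ, List.foldl_append, ih row (by omega), List.foldl_cons, List.foldl_nil]
    have hdrop : row.drop n = row[n]?.getD 0 :: row.drop (n + 1) := by
      rw [List.drop_eq_getElem_cons (by omega)]
      simp [List.getElem?_eq_getElem (by omega : n < row.length)]
    have hlen : ((List.range n).map (fun k => if Q k then (1 : Int) else row[k]?.getD 0)).length = n := by simp
    rw [hdrop, List.map_append]
    by_cases hq : Q n
    · simp [hq, hlen]
    · simp [hq]

theorem create_shape_mask_spec : Claim_equal_create_shape_mask := by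
  intro gs _
  unfold Spec_create_shape_mask create_shape_mask create_shape_mask_alt
  by_cases hgs : gs ≤ 0
  · rw [PySem.List.pyRange_one_eq_nil hgs]; simp
  -- gs > 0; write gs as a natural number n
  rw [not_le] at hgs
  obtain ⟨n, rfl⟩ : ∃ n : Nat, gs = (n : Int) := ⟨gs.toNat, (Int.toNat_of_nonneg (by omega)).symm⟩
  have hn : 0 < n := by exact_mod_cast hgs
  set c : Int := PySem.Int.floordiv (n : Int) 2 with hc
  set t : Int := PySem.Int.floordiv (n : Int) 3 with ht
  have hc2 : c = (n : Int) / 2 := PySem.Int.floordiv_eq_ediv_of_pos (by omega)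
  have ht3 : t = (n : Int) / 3 := PySem.Int.floordiv_eq_ediv_of_pos (by omega)
  have hct : 0 ≤ t ∧ t ≤ c ∧ c + t + 1 ≤ (n : Int) := by omega
  simp only [PySem.List.pyRange_zero_natCast]
  -- A side: normalize the nested folds
  rw [List.foldl_map]
  have hbody : ∀ (m : List (List Int)) (k : Nat),
      (List.map (fun k : Nat => (k : Int)) (List.range n)).foldl
        (fun m x => if |x - c| + |(k : Int) - c| ≤ t then m.modify ((k:Int)).toNat (fun r => r.set x.toNat 1) else m) m
      = m.modify k (fun r =>
          (List.range n).foldl (fun (r : List Int) (j : Nat) => if |(j : Int) - c| + |(k : Int) - c| ≤ t then r.set j 1 else r) r) := by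
    intro m k
    rw [List.foldl_map]
    have : (fun (m : List (List Int)) (j : Nat) =>
        if |(j:Int) - c| + |(k : Int) - c| ≤ t then m.modify ((k:Int)).toNat (fun r => r.set ((j:Int)).toNat 1) else m)
        = fun (m : List (List Int)) (j : Nat) => m.modify k (fun r => if |(j:Int) - c| + |(k : Int) - c| ≤ t then r.set j 1 else r) := by
      funext m j
      by_cases h : |(j:Int) - c| + |(k : Int) - c| ≤ t
      · simp [h, Int.toNat_natCast]
      · simp only [h, if_false]
        rw [show (fun r : List Int => r) = id from rfl, List.modify_id]
    rw [this, pv_foldl_modify]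
  simp only [hbody]
  have hmask0 : (List.map (fun k : Nat => (k : Int)) (List.range n)).map
      (fun _ => (List.map (fun k : Nat => (k : Int)) (List.range n)).map (fun _ => (0 : Int)))
      = List.replicate n (List.replicate n (0 : Int)) := by
    simp only [List.map_const', List.length_map, List.length_range]
  rw [hmask0, pv_foldl_range_modify _ n _ (by simp)]
  simp only [List.drop_replicate, Nat.sub_self, List.replicate_zero, List.append_nil]
  -- rows of A: each row-fold on a zero row yields the indicator map of the diamond condition
  have hArow : ∀ k : Nat, k < n →
      (List.range n).foldl (fun (r : List Int) (j : Nat) => if |(j : Int) - c| + |(k : Int) - c| ≤ t then r.set j 1 else r)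
        ((List.replicate n (List.replicate n (0:Int)))[k]?.getD [])
      = (List.range n).map (fun j : Nat => if |(j : Int) - c| + |(k : Int) - c| ≤ t then (1:Int) else 0) := by
    intro k hk
    rw [List.getElem?_replicate, if_pos hk, Option.getD_some,
      pv_foldl_range_set _ n _ (by simp)]
    simp
  -- B side: fuse the outer map and compare row by row
  rw [List.map_map]
  apply List.map_congr_left
  intro k hk
  rw [List.mem_range] at hk
  simp only [Function.comp_apply]
  rw [hArow k hk]
  -- compare A's indicator row with B's three-block row at y = k
  set a : Int := |(k : Int) - c| with ha
  have ha0 : 0 ≤ a := abs_nonneg _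
  by_cases hneg : t - a < 0
  · rw [if_pos hneg, Int.toNat_natCast]
    have hz : ∀ j ∈ List.range n, (if |(j:Int) - c| + a ≤ t then (1:Int) else 0) = 0 := by
      intro j _
      rw [if_neg]
      have := abs_nonneg ((j:Int) - c)
      omega
    rw [List.map_congr_left hz, List.map_const']
    simp
  · rw [if_neg hneg]
    have h1 : 0 ≤ c - (t - a) := by omega
    have h2 : 0 ≤ (n:Int) - c - (t - a) - 1 := by omega
    apply List.ext_getElem
    · simp only [List.length_map, List.length_range, List.length_append, List.length_replicate]
      omega
    · intro j hj hj2
      rw [List.getElem_map, List.getElem_range]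
      simp only [List.getElem_append, List.length_append, List.length_replicate,
        List.getElem_replicate]
      rcases abs_cases ((j:Int) - c) with ⟨hje, _⟩ | ⟨hje, _⟩ <;> rw [hje] <;>
        split_ifs <;> omega
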